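-- pv_equiv track=rewrite | github.com/sammm337/Iotiot-internship | main.py | _get_node_type_summary
-- ===== SOURCE A (Python) =====
-- from typing import Dict, List, Union, Any
--
-- def _get_node_type_summary(knowledge_graph: Dict) -> str:
--     """Generate a summary of node types in the graph."""
--     type_counts = {}
--     for node in knowledge_graph.get("nodes", []):
--         node_type = node.get("type", "unknown")
--         type_counts[node_type] = type_counts.get(node_type, 0) + 1
--
--     summary = ["Node Type Summary:"]
--     for type_name, count in sorted(type_counts.items()):
--         summary.append(f"- {type_name}: {count} nodes")
--
--     return "\n".join(summary)
-- ===== SOURCE B (Python) =====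
-- def _get_node_type_summary(knowledge_graph):
--     """Generate a summary of node types in the graph."""
--     types = sorted(node.get("type", "unknown") for node in knowledge_graph.get("nodes", []))
--     lines = ["Node Type Summary:"]
--     i, n = 0, len(types)
--     while i < n:
--         j = i + 1
--         while j < n and types[j] == types[i]:
--             j += 1
--         lines.append(f"- {types[i]}: {j - i} nodes")
--         i = j
--     return "\n".join(lines)
-- ===== Notes on version B (the rewrite author's own statement) =====
-- stated objective: alternative
-- what changed: replaces the hash-map count-then-sort-keys strategy with sorting the flat list of node types and counting consecutive runs by a two-pointer scan
import Mathlib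
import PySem

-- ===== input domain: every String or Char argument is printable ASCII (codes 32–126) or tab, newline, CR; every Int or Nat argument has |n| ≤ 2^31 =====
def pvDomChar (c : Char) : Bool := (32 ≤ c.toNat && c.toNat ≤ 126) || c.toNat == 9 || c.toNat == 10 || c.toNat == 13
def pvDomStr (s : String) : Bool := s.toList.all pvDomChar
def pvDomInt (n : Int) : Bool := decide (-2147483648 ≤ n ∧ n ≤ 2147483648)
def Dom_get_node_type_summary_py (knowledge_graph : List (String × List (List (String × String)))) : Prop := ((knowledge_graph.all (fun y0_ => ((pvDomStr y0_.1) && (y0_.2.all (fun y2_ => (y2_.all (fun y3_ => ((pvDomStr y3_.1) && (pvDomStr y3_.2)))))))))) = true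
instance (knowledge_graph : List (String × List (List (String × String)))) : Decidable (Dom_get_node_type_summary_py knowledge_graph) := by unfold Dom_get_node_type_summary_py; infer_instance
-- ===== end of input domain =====

-- B replaces A's hash-map counting + key-sort with sorting the flat type list and a
-- two-pointer scan over consecutive runs (objective: alternative algorithm, same cost).

-- ===== PORT A =====
-- helper: node.get("type", "unknown")
def pvNodeType (node : List (String × String)) : String :=
  (PySem.Dict.mk node).getD "type" "unknown"

-- literal port of A: count in a dict, then sort the items (tuple comparison = sorted2 fst snd)
def get_node_type_summary_py (knowledge_graph : List (String × List (List (String × String)))) : String :=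
  let nodes := (PySem.Dict.mk knowledge_graph).getD "nodes" []
  let type_counts : PySem.Dict String Int :=
    nodes.foldl (fun d node =>
      let t := pvNodeType node
      d.insert t (d.getD t 0 + 1)) PySem.Dict.empty
  let summary : List String :=
    (PySem.List.sorted2 type_counts.items (fun p => p.1) (fun p => p.2)).foldl
      (fun acc p => acc ++ ["- " ++ p.1 ++ ": " ++ PySem.Int.toStr p.2 ++ " nodes"])
      ["Node Type Summary:"]
  PySem.Str.join "\n" summary

-- ===== PORT B =====
-- B's two-pointer scan over the sorted type list: each step consumes one run
-- (inner while j loop = takeWhile/dropWhile on the rest), j - i = 1 + run length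
def pvRuns : List String → List (String × Int)
  | [] => []
  | x :: xs =>
      (x, 1 + ((xs.takeWhile (fun y => y == x)).length : Int)) ::
        pvRuns (xs.dropWhile (fun y => y == x))
termination_by l => l.length
decreasing_by
  simpa [Nat.lt_succ_iff] using (List.dropWhile_sublist (l := xs) (p := fun y => y == x)).length_le

-- port of YOUR B: sort the flat type list, scan consecutive runs
def get_node_type_summary_py_alt (knowledge_graph : List (String × List (List (String × String)))) : String :=
  let nodes := (PySem.Dict.mk knowledge_graph).getD "nodes" []
  let types := PySem.List.sorted (nodes.map pvNodeType) (fun t => t)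
  let lines : List String :=
    (pvRuns types).foldl
      (fun acc p => acc ++ ["- " ++ p.1 ++ ": " ++ PySem.Int.toStr p.2 ++ " nodes"])
      ["Node Type Summary:"]
  PySem.Str.join "\n" lines

-- ===== PRECONDITION & SPEC =====
def Spec_get_node_type_summary_py (knowledge_graph : List (String × List (List (String × String)))) (out : String) : Prop := out = get_node_type_summary_py_alt knowledge_graph
instance (knowledge_graph : List (String × List (List (String × String)))) (out : String) : Decidable (Spec_get_node_type_summary_py knowledge_graph out) := by unfold Spec_get_node_type_summary_py; infer_instance

-- ===== CLAIM (what is proved, stated in full; the proofs are below) =====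
def Claim_equal_get_node_type_summary_py : Prop := ∀ (knowledge_graph : List (String × List (List (String × String)))), Dom_get_node_type_summary_py knowledge_graph → Spec_get_node_type_summary_py knowledge_graph (get_node_type_summary_py knowledge_graph)

-- ===== LEMMAS AND PROOFS =====

-- ===== helper lemmas =====
lemma pv_insertBy_congr {α : Type} (b b' : α → α → Bool) (x : α) (acc : List α)
    (h : ∀ y ∈ acc, b x y = b' x y) :
    PySem.List.insertBy b x acc = PySem.List.insertBy b' x acc := by
  induction acc with
  | nil => rfl
  | cons y ys ih =>
      simp only [PySem.List.insertBy, h y (by simp)]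
      by_cases hb : b' x y = true
      · simp [hb]
      · simp [hb, ih (fun z hz => h z (by simp [hz]))]

lemma pv_foldl_insertBy_congr {α : Type} (b b' : α → α → Bool) (xs acc : List α)
    (h : ∀ x ∈ xs, ∀ y, (y ∈ acc ∨ y ∈ xs) → b x y = b' x y) :
    xs.foldl (fun a x => PySem.List.insertBy b x a) acc
      = xs.foldl (fun a x => PySem.List.insertBy b' x a) acc := by
  induction xs generalizing acc with
  | nil => rfl
  | cons x xs ih =>
      simp only [List.foldl_cons]
      rw [pv_insertBy_congr b b' x acc (fun y hy => h x (by simp) y (Or.inl hy))]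
      refine ih _ ?_
      intro z hz y hy
      refine h z (by simp [hz]) y ?_
      rcases hy with hy | hy
      · rcases (PySem.List.mem_insertBy _ _ _ _).mp hy with rfl | hy
        · exact Or.inr (by simp)
        · exact Or.inl hy
      · exact Or.inr (by simp [hy])

lemma pv_sorted2_eq_sorted {α κ₁ κ₂ : Type} [LinearOrder κ₁] [LinearOrder κ₂]
    (xs : List α) (k1 : α → κ₁) (k2 : α → κ₂)
    (h : ∀ a ∈ xs, ∀ b ∈ xs, k1 a = k1 b → a = b) :
    PySem.List.sorted2 xs k1 k2 = PySem.List.sorted xs k1 := by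
  unfold PySem.List.sorted2 PySem.List.sorted
  simp only [if_neg (by decide : ¬ (false = true))]
  apply pv_foldl_insertBy_congr
  intro a ha y hy
  rcases hy with hy | hy
  · simp at hy
  · rcases lt_trichotomy (k1 a) (k1 y) with hlt | heq | hgt
    · simp [hlt, not_lt_of_gt hlt]
    · have : a = y := h a ha y hy heq
      subst this; simp
    · simp [hgt, not_lt_of_gt hgt]

-- runs of a ≤-sorted list are exactly (distinct keys in < order, multiplicity)
lemma pv_runs_eq {s d : List String}
    (hs : s.Pairwise (· ≤ ·)) (hd : d.Pairwise (· < ·))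
    (hm : ∀ m, m ∈ d ↔ m ∈ s) :
    pvRuns s = d.map (fun k => (k, (s.count k : Int))) := by
  induction d generalizing s with
  | nil =>
      have hnil : s = [] := by
        cases s with
        | nil => rfl
        | cons a t => exact absurd ((hm a).mpr (by simp)) (by simp)
      subst hnil; simp [pvRuns]
  | cons k d' ih =>
      obtain ⟨x, xs, rfl⟩ : ∃ x xs, s = x :: xs := by
        cases s with
        | nil => exact absurd ((hm k).mp (by simp)) (by simp)
        | cons a t => exact ⟨a, t, rfl⟩
      have hxle : ∀ y ∈ xs, x ≤ y := (List.pairwise_cons.mp hs).1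
      have hxs' : xs.Pairwise (· ≤ ·) := (List.pairwise_cons.mp hs).2
      have hkd' : ∀ y ∈ d', k < y := (List.pairwise_cons.mp hd).1
      have hd'p : d'.Pairwise (· < ·) := (List.pairwise_cons.mp hd).2
      have hxk : k = x := by
        have hxd : x ∈ k :: d' := (hm x).mpr (by simp)
        have hks : k ∈ x :: xs := (hm k).mp (by simp)
        have hxle_k : x ≤ k := by
          rcases List.mem_cons.mp hks with rfl | hks
          · rfl
          · exact hxle k hks
        rcases List.mem_cons.mp hxd with rfl | hxd
        · rfl
        · exact absurd (hkd' x hxd) (not_lt_of_ge hxle_k)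
      subst hxk
      set t := xs.takeWhile (fun y => y == k) with ht
      set r := xs.dropWhile (fun y => y == k) with hr
      have hsplit : xs = t ++ r := (List.takeWhile_append_dropWhile).symm
      have htall : ∀ y ∈ t, y = k := by
        intro y hy
        exact eq_of_beq (List.mem_takeWhile_imp (p := fun y => y == k) (l := xs) (x := y) (ht ▸ hy))
      have hrgt : ∀ y ∈ r, k < y := by
        intro y hy
        cases hhead : r with
        | nil => rw [hhead] at hy; simp at hy
        | cons h0 rt =>
            have hh0 : ¬ (h0 == k) = true := by
              have h2 := List.head?_dropWhile_not (fun y => y == k) xs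
              rw [← hr, hhead] at h2
              simp only [List.head?_cons] at h2
              simp [h2]
            have hh0k : k < h0 := lt_of_le_of_ne
              (hxle h0 (by rw [hsplit, hhead]; simp)) (fun h => hh0 (by simp [h]))
            rw [hhead] at hy
            rcases List.mem_cons.mp hy with rfl | hy
            · exact hh0k
            · have hrp : r.Pairwise (· ≤ ·) :=
                hxs'.sublist (List.dropWhile_sublist _)
              rw [hhead] at hrp
              exact lt_of_lt_of_le hh0k ((List.pairwise_cons.mp hrp).1 y hy)
      have hrs : r.Pairwise (· ≤ ·) := hxs'.sublist (List.dropWhile_sublist _)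
      have hmem' : ∀ m, m ∈ d' ↔ m ∈ r := by
        intro m
        constructor
        · intro hmd
          have hmk : k < m := hkd' m hmd
          have hms : m ∈ k :: xs := (hm m).mp (by simp [hmd])
          rcases List.mem_cons.mp hms with rfl | hms
          · exact absurd hmk (lt_irrefl _)
          · rw [hsplit] at hms
            rcases List.mem_append.mp hms with hmt | hmr
            · exact absurd (htall m hmt ▸ hmk) (lt_irrefl _)
            · exact hmr
        · intro hmr
          have hms : m ∈ k :: d' := (hm m).mpr (by rw [hsplit]; simp [hmr])
          rcases List.mem_cons.mp hms with rfl | hms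
          · exact absurd (hrgt m hmr) (lt_irrefl _)
          · exact hms
      have hcount_r : ∀ m ∈ d', (k :: xs).count m = r.count m := by
        intro m hmd
        have hmk : m ≠ k := fun h => absurd (h ▸ hkd' m hmd) (lt_irrefl _)
        rw [List.count_cons, hsplit, List.count_append]
        have hz : t.count m = 0 := by
          rw [List.count_eq_zero]
          intro hmt; exact hmk (htall m hmt)
        simp [hz, Ne.symm hmk]
      have hcount_k : (k :: xs).count k = 1 + t.length := by
        rw [List.count_cons, hsplit, List.count_append]
        have h1 : t.count k = t.length := by
          rw [List.count_eq_length]; intro y hy; simp [htall y hy]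
        have h2 : r.count k = 0 := by
          rw [List.count_eq_zero]
          intro hk; exact absurd (hrgt k hk) (lt_irrefl _)
        simp [h1, h2]; omega
      rw [pvRuns]
      simp only [List.map_cons]
      congr 1
      · rw [← ht, hcount_k]; push_cast; ring_nf
      · rw [ih hrs hd'p hmem']
        refine (List.map_congr_left (fun m hmd => ?_)).symm
        simp [hcount_r m hmd]

-- the common pair list both ports print
lemma pv_pairs_eq (ts : List String) :
    PySem.List.sorted2
        ((PySem.Dict.counter ts (κ := String)).items) (fun p => p.1) (fun p => p.2)
      = pvRuns (PySem.List.sorted ts (fun t => t)) := by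
  set D := PySem.List.sorted (PySem.Set.ofList ts) (fun k => k) with hD
  have hDperm : D.Perm (PySem.Set.ofList ts) := PySem.List.sorted_perm _ _ _
  have hDlt : D.Pairwise (· < ·) := PySem.List.sorted_ofList_pairwise_lt ts
  have hsp : (PySem.List.sorted ts (fun t => t)).Perm ts := PySem.List.sorted_perm _ _ _
  have hA : PySem.List.sorted2
      ((PySem.Dict.counter ts (κ := String)).items) (fun p => p.1) (fun p => p.2)
      = D.map (fun k => (k, (ts.count k : Int))) := by
    rw [PySem.Dict.items_counter]
    rw [pv_sorted2_eq_sorted _ _ _ (by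
      intro a ha b hb hk
      simp only [List.mem_map] at ha hb
      obtain ⟨ka, _, rfl⟩ := ha; obtain ⟨kb, _, rfl⟩ := hb
      simp only at hk; simp [hk])]
    refine PySem.List.sorted_eq_of_perm_of_pairwise_lt _ _ _ (hDperm.map _) ?_
    exact List.Pairwise.map _ (fun a b h => h) hDlt
  have hB : pvRuns (PySem.List.sorted ts (fun t => t))
      = D.map (fun k => (k, (ts.count k : Int))) := by
    rw [pv_runs_eq (PySem.List.sorted_pairwise ts (fun t => t)) hDlt
      (fun m => by rw [hDperm.mem_iff, PySem.Set.mem_ofList, PySem.List.mem_sorted])]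
    exact List.map_congr_left (fun m _ => by rw [hsp.count_eq])
  rw [hA, hB]

-- ===== VERDICT (by name: the statement is the Claim_ definition above) =====
theorem get_node_type_summary_py_spec : Claim_equal_get_node_type_summary_py := by
  intro kg _
  unfold Spec_get_node_type_summary_py get_node_type_summary_py get_node_type_summary_py_alt
  have h1 : (PySem.Dict.getD (PySem.Dict.mk kg) "nodes" []).foldl
      (fun d node =>
        let t := pvNodeType node
        d.insert t (d.getD t 0 + 1)) PySem.Dict.empty
      = PySem.Dict.counter ((PySem.Dict.getD (PySem.Dict.mk kg) "nodes" []).map pvNodeType) := by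
    rw [← PySem.Dict.foldl_insert_getD_add_one_eq_counter, List.foldl_map]
  simp only [h1, pv_pairs_eq]
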